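-- pv_equiv track=rewrite | github.com/sathyaramdhanalakshmi/python | Day3/test1/string_analysis.py | string_analysis
-- ===== SOURCE A (Python) =====
-- def string_analysis(str):
--     vowels="aeiouAEIOU"
--     digits="0123456789"
--     cntvowels=0
--     cntconso=0
--     cntdigits=0
--     cntspecialchar=0
--     for char in str:
--         if char in vowels:
--             cntvowels+=1
--         elif char in digits:
--             cntdigits+=1
--         elif char.isalpha():
--             cntconso+=1
--         else:
--             cntspecialchar+=1
--
--     reversedstring= str[::-1]
--
--     return(cntvowels,cntconso,cntdigits,cntspecialchar,reversedstring)
-- ===== SOURCE B (Python) =====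
-- def string_analysis(str):
--     v = sum(c in "aeiouAEIOU" for c in str)
--     d = sum(c in "0123456789" for c in str)
--     a = sum(c.isalpha() for c in str)
--     return (v, a - v, d, len(str) - a - d, ''.join(reversed(str)))
-- ===== Notes on version B (the rewrite author's own statement) =====
-- stated objective: simpler
-- what changed: Replaces the interleaved four-way priority cascade with three independent aggregate counts (vowels, digits, alpha) and derives consonants and specials by arithmetic; reverse via reversed+join instead of a slice.
import Mathlib
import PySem

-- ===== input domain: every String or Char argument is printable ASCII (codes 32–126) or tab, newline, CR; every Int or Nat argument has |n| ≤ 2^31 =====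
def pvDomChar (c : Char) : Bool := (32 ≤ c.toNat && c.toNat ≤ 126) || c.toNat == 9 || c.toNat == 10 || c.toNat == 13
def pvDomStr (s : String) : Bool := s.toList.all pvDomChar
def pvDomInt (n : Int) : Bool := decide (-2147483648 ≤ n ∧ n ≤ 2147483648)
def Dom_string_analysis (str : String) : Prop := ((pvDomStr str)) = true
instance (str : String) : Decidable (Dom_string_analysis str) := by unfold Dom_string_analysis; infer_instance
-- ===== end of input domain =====

-- B replaces A's single interleaved four-way priority cascade by independent aggregate
-- counts (vowels, digits, alpha) plus arithmetic derivation of consonants and specials (objective: simpler).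


-- ===== PORT A =====
-- Literal transliteration: one loop updating four counters with the same branch order,
-- then the slice str[::-1].
def string_analysis (str : String) : Int × Int × Int × Int × String :=
  let vowels := "aeiouAEIOU"
  let digits := "0123456789"
  let st := str.toList.foldl
    (fun (acc : Int × Int × Int × Int) char =>
      if PySem.Chars.isIn [char] vowels.toList then
        (acc.1 + 1, acc.2.1, acc.2.2.1, acc.2.2.2)
      else if PySem.Chars.isIn [char] digits.toList then
        (acc.1, acc.2.1, acc.2.2.1 + 1, acc.2.2.2)
      else if PySem.Chars.isalpha char then
        (acc.1, acc.2.1 + 1, acc.2.2.1, acc.2.2.2)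
      else
        (acc.1, acc.2.1, acc.2.2.1, acc.2.2.2 + 1))
    (0, 0, 0, 0)
  let reversedstring := String.ofList ((PySem.List.slice? str.toList none none (-1)).getD [])
  (st.1, st.2.1, st.2.2.1, st.2.2.2, reversedstring)

-- ===== PORT B =====
-- Three independent counts; consonants and specials derived arithmetically.
def string_analysis_alt (str : String) : Int × Int × Int × Int × String :=
  let l := str.toList
  let v : Int := l.countP (fun c => PySem.Chars.isIn [c] "aeiouAEIOU".toList)
  let d : Int := l.countP (fun c => PySem.Chars.isIn [c] "0123456789".toList)
  let a : Int := l.countP (fun c => PySem.Chars.isalpha c)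
  (v, a - v, d, (l.length : Int) - a - d, String.ofList l.reverse)

-- ===== PRECONDITION & SPEC =====
def Spec_string_analysis (str : String) (out : Int × Int × Int × Int × String) : Prop := out = string_analysis_alt str
instance (str : String) (out : Int × Int × Int × Int × String) : Decidable (Spec_string_analysis str out) := by unfold Spec_string_analysis; infer_instance

-- ===== CLAIM (what is proved, stated in full; the proofs are below) =====
def Claim_equal_string_analysis : Prop := ∀ (str : String), Dom_string_analysis str → Spec_string_analysis str (string_analysis str)

-- ===== LEMMAS AND PROOFS =====

-- single-character 'c in s' is membership
lemma isIn_single (c : Char) (l : List Char) :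
    PySem.Chars.isIn [c] l = l.contains c := by
  rcases h : PySem.Chars.isIn [c] l with _ | _
  · rw [PySem.Chars.isIn_eq_false_iff] at h
    simp [List.singleton_infix_iff] at h
    simp [h]
  · rw [PySem.Chars.isIn_iff_infix] at h
    simp [List.singleton_infix_iff] at h
    simp [h]

lemma vowel_alpha (c : Char) (h : PySem.Chars.isIn [c] "aeiouAEIOU".toList = true) :
    PySem.Chars.isalpha c = true := by
  rw [isIn_single] at h
  simp [List.contains_eq_mem] at h
  rcases h with h|h|h|h|h|h|h|h|h|h <;> subst h <;> decide

lemma digit_not_alpha (c : Char) (h : PySem.Chars.isIn [c] "0123456789".toList = true) :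
    PySem.Chars.isalpha c = false := by
  rw [isIn_single] at h
  simp [List.contains_eq_mem] at h
  rcases h with h|h|h|h|h|h|h|h|h|h <;> subst h <;> decide

-- the four branch predicates of A's cascade
def pA (c : Char) : Bool := PySem.Chars.isIn [c] "aeiouAEIOU".toList
def pD (c : Char) : Bool := !(pA c) && PySem.Chars.isIn [c] "0123456789".toList
def pC (c : Char) : Bool := !(pA c) && !(PySem.Chars.isIn [c] "0123456789".toList) && PySem.Chars.isalpha c
def pS (c : Char) : Bool := !(pA c) && !(PySem.Chars.isIn [c] "0123456789".toList) && !(PySem.Chars.isalpha c)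

lemma foldA (l : List Char) : ∀ cv cc cd cs : Int,
    l.foldl
    (fun (acc : Int × Int × Int × Int) char =>
      if PySem.Chars.isIn [char] "aeiouAEIOU".toList then
        (acc.1 + 1, acc.2.1, acc.2.2.1, acc.2.2.2)
      else if PySem.Chars.isIn [char] "0123456789".toList then
        (acc.1, acc.2.1, acc.2.2.1 + 1, acc.2.2.2)
      else if PySem.Chars.isalpha char then
        (acc.1, acc.2.1 + 1, acc.2.2.1, acc.2.2.2)
      else
        (acc.1, acc.2.1, acc.2.2.1, acc.2.2.2 + 1))
    (cv, cc, cd, cs)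
    = (cv + (l.countP pA : Int), cc + (l.countP pC : Int),
       cd + (l.countP pD : Int), cs + (l.countP pS : Int)) := by
  induction l with
  | nil => intro cv cc cd cs; simp
  | cons x xs ih =>
    intro cv cc cd cs
    rw [List.foldl_cons]
    by_cases hv : PySem.Chars.isIn [x] "aeiouAEIOU".toList = true
    · have h1 : pA x = true := hv
      have h2 : pD x = false := by simp [pD, h1]
      have h3 : pC x = false := by simp [pC, h1]
      have h4 : pS x = false := by simp [pS, h1]
      rw [if_pos hv, ih]
      simp only [List.countP_cons, h1, h2, h3, h4]
      simp; omega
    · rw [Bool.not_eq_true] at hv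
      have h1 : pA x = false := hv
      rw [if_neg (by rw [hv]; simp)]
      by_cases hd : PySem.Chars.isIn [x] "0123456789".toList = true
      · have h2 : pD x = true := by unfold pD; rw [h1, hd]; decide
        have h3 : pC x = false := by unfold pC; rw [hd]; simp
        have h4 : pS x = false := by unfold pS; rw [hd]; simp
        rw [if_pos hd, ih]
        simp only [List.countP_cons, h1, h2, h3, h4]
        simp; omega
      · rw [Bool.not_eq_true] at hd
        have h2 : pD x = false := by unfold pD; rw [hd]; simp
        rw [if_neg (by rw [hd]; simp)]
        by_cases ha : PySem.Chars.isalpha x = true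
        · have h3 : pC x = true := by unfold pC; rw [h1, hd, ha]; decide
          have h4 : pS x = false := by simp [pS, ha]
          rw [if_pos ha, ih]
          simp only [List.countP_cons, h1, h2, h3, h4]
          simp; omega
        · rw [Bool.not_eq_true] at ha
          have h3 : pC x = false := by simp [pC, ha]
          have h4 : pS x = true := by unfold pS; rw [h1, hd, ha]; decide
          rw [if_neg (by rw [ha]; simp), ih]
          simp only [List.countP_cons, h1, h2, h3, h4]
          simp; omega

-- pointwise classification facts used to relate B's aggregate counts to A's branch counts
lemma alpha_split (l : List Char) :
    l.countP (fun c => PySem.Chars.isalpha c) = l.countP pA + l.countP pC := by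
  induction l with
  | nil => simp
  | cons x xs ih =>
    simp only [List.countP_cons, ih]
    by_cases hv : pA x = true
    · have ha : PySem.Chars.isalpha x = true := vowel_alpha x hv
      have h3 : pC x = false := by simp [pC, hv]
      simp only [hv, h3, ha]
      simp; omega
    · rw [Bool.not_eq_true] at hv
      by_cases hd : PySem.Chars.isIn [x] "0123456789".toList = true
      · have ha : PySem.Chars.isalpha x = false := digit_not_alpha x hd
        have h3 : pC x = false := by simp [pC, ha]
        simp only [hv, h3, ha]
        simp
      · rw [Bool.not_eq_true] at hd
        by_cases ha : PySem.Chars.isalpha x = true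
        · have h3 : pC x = true := by unfold pC; rw [hv, hd, ha]; decide
          simp only [hv, h3, ha]
          simp; omega
        · rw [Bool.not_eq_true] at ha
          have h3 : pC x = false := by simp [pC, ha]
          simp only [hv, h3, ha]
          simp

lemma digits_eq (l : List Char) :
    l.countP (fun c => PySem.Chars.isIn [c] "0123456789".toList) = l.countP pD := by
  apply List.countP_congr
  intro c _
  by_cases hd : PySem.Chars.isIn [c] "0123456789".toList = true
  · have hv : pA c = false := by
      rcases h : pA c with _|_
      · rfl
      · exact absurd (vowel_alpha c h)
          (by rw [digit_not_alpha c hd]; simp)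
    unfold pD; rw [hv, hd]; decide
  · rw [Bool.not_eq_true] at hd
    unfold pD; rw [hd]; simp

lemma length_split (l : List Char) :
    l.length = l.countP pA + l.countP pC + l.countP pD + l.countP pS := by
  induction l with
  | nil => simp
  | cons x xs ih =>
    simp only [List.countP_cons, List.length_cons, ih]
    by_cases hv : pA x = true
    · have h2 : pD x = false := by simp [pD, hv]
      have h3 : pC x = false := by simp [pC, hv]
      have h4 : pS x = false := by simp [pS, hv]
      simp only [hv, h2, h3, h4]; simp; omega
    · rw [Bool.not_eq_true] at hv
      by_cases hd : PySem.Chars.isIn [x] "0123456789".toList = true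
      · have h2 : pD x = true := by unfold pD; rw [hv, hd]; decide
        have h3 : pC x = false := by unfold pC; rw [hd]; simp
        have h4 : pS x = false := by unfold pS; rw [hd]; simp
        simp only [hv, h2, h3, h4]; simp; omega
      · rw [Bool.not_eq_true] at hd
        by_cases ha : PySem.Chars.isalpha x = true
        · have h2 : pD x = false := by unfold pD; rw [hd]; simp
          have h3 : pC x = true := by unfold pC; rw [hv, hd, ha]; decide
          have h4 : pS x = false := by simp [pS, ha]
          simp only [hv, h2, h3, h4]; simp; omega
        · rw [Bool.not_eq_true] at ha
          have h2 : pD x = false := by unfold pD; rw [hd]; simp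
          have h3 : pC x = false := by simp [pC, ha]
          have h4 : pS x = true := by unfold pS; rw [hv, hd, ha]; decide
          simp only [hv, h2, h3, h4]; simp; omega

lemma vowels_eq (l : List Char) :
    l.countP (fun c => PySem.Chars.isIn [c] "aeiouAEIOU".toList) = l.countP pA := by
  apply List.countP_congr
  intro c _
  simp [pA]

-- ===== VERDICT (by name: the statement is the Claim_ definition above) =====
theorem string_analysis_spec : Claim_equal_string_analysis := by
  intro str _
  unfold Spec_string_analysis string_analysis string_analysis_alt
  simp only [foldA, PySem.List.slice?_none_none_neg_one, Option.getD_some]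
  have h1 := alpha_split str.toList
  have h2 := digits_eq str.toList
  have h3 := length_split str.toList
  have h4 := vowels_eq str.toList
  refine Prod.ext ?_ (Prod.ext ?_ (Prod.ext ?_ (Prod.ext ?_ ?_))) <;> simp at h1 h2 h3 h4 ⊢ <;> omega
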